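-- pv_equiv track=rewrite | github.com/lekalache/fr-rap-classement | data-pipeline/collectors/genius_client.py | _clean_lyrics
-- ===== SOURCE A (Python) =====
-- def _clean_lyrics(lyrics: str) -> str:
--     """Clean up raw lyrics text.
--
--     Args:
--         lyrics: Raw lyrics from Genius.
--
--     Returns:
--         Cleaned lyrics text.
--     """
--     if not lyrics:
--         return ""
--
--     lines = lyrics.split('\n')
--     cleaned_lines = []
--
--     for line in lines:
--         line = line.strip()
--
--         # Skip contributor/embed lines
--         if "Contributors" in line or "Embed" in line:
--             continue
--         # Skip section headers like [Verse 1]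
--         if line.startswith('[') and line.endswith(']'):
--             continue
--         # Skip "You might also like" recommendations
--         if "You might also like" in line:
--             continue
--         # Skip empty lines at the start
--         if not cleaned_lines and not line:
--             continue
--
--         cleaned_lines.append(line)
--
--     # Join and clean up
--     text = '\n'.join(cleaned_lines)
--
--     # Remove multiple consecutive newlines
--     while '\n\n\n' in text:
--         text = text.replace('\n\n\n', '\n\n')
--
--     return text.strip()
-- ===== SOURCE B (Python) =====
-- def _clean_lyrics(lyrics: str) -> str:
--     """Clean up raw lyrics text in a single pass (no join-and-rescan)."""
--     cleaned = []
--     prev_blank = True  # True drops leading blanks and collapses runs of blanks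
--     for line in lyrics.split('\n'):
--         line = line.strip()
--         if "Contributors" in line or "Embed" in line:
--             continue
--         if line.startswith('[') and line.endswith(']'):
--             continue
--         if "You might also like" in line:
--             continue
--         if not line:
--             if not prev_blank:
--                 cleaned.append(line)
--             prev_blank = True
--         else:
--             cleaned.append(line)
--             prev_blank = False
--     if cleaned and not cleaned[-1]:
--         cleaned.pop()
--     return '\n'.join(cleaned)
-- ===== Notes on version B (the rewrite author's own statement) =====
-- stated objective: simpler
-- what changed: B builds the cleaned text in one pass with a prev_blank flag that drops leading blank lines and collapses each run of blank lines as it goes, popping a single trailing blank at the end, so A's join-then-repeated replace rescans that squeeze triple newlines and A's final strip() disappear.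
import Mathlib
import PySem

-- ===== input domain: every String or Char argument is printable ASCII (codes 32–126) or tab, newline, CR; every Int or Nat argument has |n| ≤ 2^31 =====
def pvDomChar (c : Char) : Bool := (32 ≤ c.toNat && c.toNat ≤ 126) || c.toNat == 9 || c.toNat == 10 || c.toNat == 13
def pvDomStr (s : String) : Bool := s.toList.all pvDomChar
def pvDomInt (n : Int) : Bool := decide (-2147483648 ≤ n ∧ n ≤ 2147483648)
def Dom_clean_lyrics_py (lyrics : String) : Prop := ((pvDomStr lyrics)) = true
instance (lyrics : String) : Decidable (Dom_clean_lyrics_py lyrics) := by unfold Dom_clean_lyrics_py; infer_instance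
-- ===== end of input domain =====

-- B (clean_lyrics_py_alt) collapses blank-line runs in the same single pass that filters the lines,
-- replacing A's join-then-repeated-replace rescans and final strip() (objective: simpler).

-- ===== PORT A =====
-- pvRep is the action of one `text.replace('\n\n\n','\n\n')` pass; the three lemmas below it are
-- cited by pvCollapse (the port of A's `while '\n\n\n' in text` loop) to justify termination.
def pvRep : List Char → List Char
  | '\n' :: '\n' :: '\n' :: t => '\n' :: '\n' :: pvRep t
  | c :: t => c :: pvRep t
  | [] => []

theorem pvRep_cons_of {c : Char} {t : List Char} (h : ¬ (['\n','\n','\n'] <+: c :: t)) :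
    pvRep (c :: t) = c :: pvRep t :=
  pvRep.eq_2 c t (fun t1 hc ht => h (by subst hc; subst ht; exact ⟨t1, rfl⟩))

theorem pvRep_go (fuel : Nat) (l acc : List Char) (h : l.length ≤ fuel) :
    PySem.Chars.replace.go ['\n','\n','\n'] ['\n','\n'] fuel l acc = acc.reverse ++ pvRep l := by
  induction fuel generalizing l acc with
  | zero =>
    have : l = [] := List.eq_nil_of_length_eq_zero (Nat.le_zero.mp h)
    subst this
    rw [PySem.Chars.replace.go.eq_def]; simp [pvRep]
  | succ n ih =>
    cases l with
    | nil => rw [PySem.Chars.replace.go.eq_def]; simp [pvRep]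
    | cons c t =>
      rw [PySem.Chars.replace.go.eq_def]
      simp only []
      by_cases hpre : ['\n','\n','\n'] <+: c :: t
      · obtain ⟨t', ht'⟩ := hpre
        obtain ⟨rfl, rfl⟩ : c = '\n' ∧ t = '\n' :: '\n' :: t' := by
          have := ht'.symm; simp at this; tauto
        simp only [List.isPrefixOf_iff_prefix]
        rw [if_pos ⟨t', rfl⟩]
        rw [ih _ _ (by simp at h ⊢; omega)]
        simp [pvRep]
      · simp only [List.isPrefixOf_iff_prefix]
        rw [if_neg hpre]
        rw [ih _ _ (by simp at h ⊢; omega)]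
        rw [pvRep_cons_of hpre]
        simp

theorem pvReplace_eq_pvRep (t : List Char) :
    PySem.Chars.replace t ['\n','\n','\n'] ['\n','\n'] = pvRep t := by
  rw [PySem.Chars.replace]
  simp only [List.isEmpty_iff, reduceIte, List.reverse_nil]
  rw [pvRep_go t.length t [] le_rfl]
  simp

theorem pvRep_length_le (t : List Char) : (pvRep t).length ≤ t.length := by
  induction t using pvRep.induct with
  | case1 t ih => simp [pvRep.eq_1]; omega
  | case2 c t hne ih => rw [pvRep.eq_2 c t hne]; simpa using ih
  | case3 => simp [pvRep]

theorem pvRep_length_lt (t : List Char) (h : ['\n','\n','\n'] <:+: t) :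
    (pvRep t).length < t.length := by
  induction t using pvRep.induct with
  | case1 t ih =>
    have := pvRep_length_le t
    simp [pvRep.eq_1]; omega
  | case2 c t hne ih =>
    rw [pvRep.eq_2 c t hne]
    have ht : ['\n','\n','\n'] <:+: t := by
      rcases List.infix_cons_iff.mp h with hp | hi
      · exfalso
        obtain ⟨t', ht'⟩ := hp
        have : c = '\n' ∧ t = '\n' :: '\n' :: t' := by have := ht'.symm; simp at this; tauto
        exact hne t' this.1 this.2
      · exact hi
    simpa using ih ht
  | case3 => simp at h

def pvCollapse (t : List Char) : List Char :=
  if PySem.Chars.isIn ['\n','\n','\n'] t then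
    pvCollapse (PySem.Chars.replace t ['\n','\n','\n'] ['\n','\n'])
  else t
termination_by t.length
decreasing_by
  rw [pvReplace_eq_pvRep]
  exact pvRep_length_lt t ((PySem.Chars.isIn_iff_infix _ _).mp (by assumption))

-- loop body of A's `for line in lines` (a helper kept as a helper)
def pvStepA (acc : List (List Char)) (line : List Char) : List (List Char) :=
  let line := PySem.Chars.strip line
  if PySem.Chars.isIn "Contributors".toList line || PySem.Chars.isIn "Embed".toList line then acc
  else if PySem.Chars.startswith line "[".toList && PySem.Chars.endswith line "]".toList then acc
  else if PySem.Chars.isIn "You might also like".toList line then acc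
  else if acc.isEmpty && line.isEmpty then acc
  else acc ++ [line]

def clean_lyrics_py (lyrics : String) : String :=
  if lyrics = "" then "" else
  let lines := PySem.Chars.splitOn lyrics.toList ['\n']
  let cleaned := lines.foldl pvStepA []
  let text := PySem.Chars.join ['\n'] cleaned
  String.ofList (PySem.Chars.strip (pvCollapse text))

-- ===== PORT B =====
-- loop body of B's single pass: state = (cleaned, prev_blank)
def pvStepB (st : List (List Char) × Bool) (line : List Char) : List (List Char) × Bool :=
  let line := PySem.Chars.strip line
  if PySem.Chars.isIn "Contributors".toList line || PySem.Chars.isIn "Embed".toList line then st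
  else if PySem.Chars.startswith line "[".toList && PySem.Chars.endswith line "]".toList then st
  else if PySem.Chars.isIn "You might also like".toList line then st
  else if line.isEmpty then (if st.2 then st else (st.1 ++ [line], true))
  else (st.1 ++ [line], false)

def clean_lyrics_py_alt (lyrics : String) : String :=
  let st := (PySem.Chars.splitOn lyrics.toList ['\n']).foldl pvStepB ([], true)
  let cleaned := st.1
  let cleaned := if PySem.List.pyGet? cleaned (-1) = some [] then cleaned.dropLast else cleaned
  String.ofList (PySem.Chars.join ['\n'] cleaned)

-- ===== PRECONDITION & SPEC =====
def Spec_clean_lyrics_py (lyrics : String) (out : String) : Prop := out = clean_lyrics_py_alt lyrics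
instance (lyrics : String) (out : String) : Decidable (Spec_clean_lyrics_py lyrics out) := by unfold Spec_clean_lyrics_py; infer_instance

-- ===== CLAIM (what is proved, stated in full; the proofs are below) =====
def Claim_equal_clean_lyrics_py : Prop := ∀ (lyrics : String), Dom_clean_lyrics_py lyrics → Spec_clean_lyrics_py lyrics (clean_lyrics_py lyrics)

-- ===== LEMMAS AND PROOFS =====
-- the canonical collapse: runs of ≥3 newlines become 2
def pvNorm : List Char → List Char
  | a :: b :: c :: r =>
    if a = '\n' ∧ b = '\n' ∧ c = '\n' then pvNorm (b :: c :: r)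
    else a :: pvNorm (b :: c :: r)
  | l => l

theorem pvNorm_cons_ne {c : Char} (t : List Char) (hc : c ≠ '\n') :
    pvNorm (c :: t) = c :: pvNorm t := by
  match t with
  | [] => rfl
  | [b] => rfl
  | b :: d :: r => rw [pvNorm]; rw [if_neg (by tauto)]

-- append a newline-free block on the left
theorem pvNorm_append_left (x r : List Char) (hx : '\n' ∉ x) :
    pvNorm (x ++ r) = x ++ pvNorm r := by
  induction x with
  | nil => rfl
  | cons c x ih =>
    simp only [List.mem_cons, not_or] at hx
    rw [List.cons_append, pvNorm_cons_ne _ (Ne.symm hx.1), ih hx.2]; simp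

theorem pvNorm_triple (r : List Char) :
    pvNorm ('\n' :: '\n' :: '\n' :: r) = pvNorm ('\n' :: '\n' :: r) := by
  rw [pvNorm]; rw [if_pos ⟨rfl, rfl, rfl⟩]

theorem pvNorm_one {X : List Char} (hX : X = [] ∨ ∃ c Y, X = c :: Y ∧ c ≠ '\n') :
    pvNorm ('\n' :: X) = '\n' :: pvNorm X := by
  rcases hX with rfl | ⟨c, Y, rfl, hc⟩
  · rfl
  · match Y with
    | [] => rfl
    | d :: Y' =>
      rw [pvNorm, if_neg (by tauto), pvNorm_cons_ne _ hc]

theorem pvNorm_two {X : List Char} (hX : X = [] ∨ ∃ c Y, X = c :: Y ∧ c ≠ '\n') :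
    pvNorm ('\n' :: '\n' :: X) = '\n' :: '\n' :: pvNorm X := by
  rcases hX with rfl | ⟨c, Y, rfl, hc⟩
  · rfl
  · rw [pvNorm, if_neg (by tauto), pvNorm_one (Or.inr ⟨c, Y, rfl, hc⟩)]

-- P: pvNorm over a newline run followed by a non-newline head
theorem pvNorm_run (k : Nat) (X : List Char) (hX : X = [] ∨ ∃ c Y, X = c :: Y ∧ c ≠ '\n') :
    pvNorm (List.replicate k '\n' ++ X) = List.replicate (min k 2) '\n' ++ pvNorm X := by
  induction k using Nat.strong_induction_on with
  | _ k ih =>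
  match k with
  | 0 => simp
  | 1 => simpa [List.replicate_succ] using pvNorm_one hX
  | 2 => simpa [List.replicate_succ] using pvNorm_two hX
  | (m+3) =>
    have h3 : List.replicate (m+3) '\n' ++ X = '\n' :: '\n' :: '\n' :: (List.replicate m '\n' ++ X) := by
      simp [List.replicate_succ]
    have h2 : ('\n' :: '\n' :: (List.replicate m '\n' ++ X)) = List.replicate (m+2) '\n' ++ X := by
      simp [List.replicate_succ]
    rw [h3, pvNorm_triple, h2, ih (m+2) (by omega)]
    congr 2
    omega

theorem pvRepl_snoc (k : Nat) (X : List Char) :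
    List.replicate k '\n' ++ '\n' :: X = List.replicate (k+1) '\n' ++ X := by
  rw [List.replicate_succ', List.append_assoc]; rfl

theorem pvNorm_run_succ (m : Nat) (hm : 2 ≤ m) (X : List Char) :
    pvNorm (List.replicate (m+1) '\n' ++ X) = pvNorm (List.replicate m '\n' ++ X) := by
  obtain ⟨m', rfl⟩ : ∃ m', m = m' + 2 := ⟨m - 2, by omega⟩
  have h3 : List.replicate (m'+3) '\n' ++ X = '\n' :: '\n' :: '\n' :: (List.replicate m' '\n' ++ X) := by
    simp [List.replicate_succ]
  have h2 : ('\n' :: '\n' :: (List.replicate m' '\n' ++ X)) = List.replicate (m'+2) '\n' ++ X := by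
    simp [List.replicate_succ]
  rw [h3, pvNorm_triple, h2]

-- M': pvNorm is invariant under one replace pass, below any pending newline run
theorem pvNorm_rep (cs : List Char) (k : Nat) :
    pvNorm (List.replicate k '\n' ++ pvRep cs) = pvNorm (List.replicate k '\n' ++ cs) := by
  induction cs using pvRep.induct generalizing k with
  | case1 t ih =>
    rw [pvRep.eq_1]
    have l1 : List.replicate k '\n' ++ '\n' :: '\n' :: pvRep t = List.replicate (k+2) '\n' ++ pvRep t := by
      rw [pvRepl_snoc, pvRepl_snoc]
    have l2 : List.replicate k '\n' ++ '\n' :: '\n' :: '\n' :: t = List.replicate (k+3) '\n' ++ t := by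
      rw [pvRepl_snoc, pvRepl_snoc, pvRepl_snoc]
    rw [l1, l2, ih (k+2), pvNorm_run_succ (k+2) (by omega)]
  | case2 c t hne ih =>
    rw [pvRep.eq_2 c t hne]
    by_cases hc : c = '\n'
    · subst hc
      have l1 : ∀ X : List Char, List.replicate k '\n' ++ '\n' :: X = List.replicate (k+1) '\n' ++ X :=
        fun X => pvRepl_snoc k X
      rw [l1, l1, ih (k+1)]
    · have hX : ∀ Y, ∃ c' Y', c :: Y = c' :: Y' ∧ c' ≠ '\n' := fun Y => ⟨c, Y, rfl, hc⟩
      rw [pvNorm_run k _ (Or.inr (hX _)), pvNorm_run k _ (Or.inr (hX _)),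
        pvNorm_cons_ne _ hc, pvNorm_cons_ne _ hc]
      have := ih 0
      simpa using this
  | case3 => rfl

theorem pvNorm_of_no_triple {cs : List Char} (h : ¬ ['\n','\n','\n'] <:+: cs) : pvNorm cs = cs := by
  match cs with
  | [] => rfl
  | [a] => rfl
  | [a, b] => rfl
  | a :: b :: c :: r =>
    rw [pvNorm]
    rw [if_neg (fun ⟨h1, h2, h3⟩ => h (by subst h1 h2 h3; exact ⟨[], r, rfl⟩))]
    rw [pvNorm_of_no_triple (fun hi => h (List.infix_cons_iff.mpr (Or.inr hi)))]

theorem pvCollapse_eq_pvNorm (t : List Char) : pvCollapse t = pvNorm t := by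
  rw [pvCollapse]
  by_cases h : PySem.Chars.isIn ['\n','\n','\n'] t = true
  · rw [if_pos h, pvReplace_eq_pvRep, pvCollapse_eq_pvNorm (pvRep t)]
    simpa using pvNorm_rep t 0
  · rw [if_neg h]
    exact (pvNorm_of_no_triple (fun hi => h ((PySem.Chars.isIn_iff_infix _ _).mpr hi))).symm
termination_by t.length
decreasing_by
  exact pvRep_length_lt t ((PySem.Chars.isIn_iff_infix _ _).mp (by assumption))

-- split by '\n', structurally
def pvSplit : List Char → List (List Char)
  | [] => [[]]
  | c :: t =>
    match pvSplit t with
    | h :: r => if c = '\n' then [] :: h :: r else (c :: h) :: r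
    | [] => [[]]

theorem pvSplit_ne_nil (l : List Char) : pvSplit l ≠ [] := by
  match l with
  | [] => simp [pvSplit]
  | c :: t =>
    rw [pvSplit]
    rcases hs : pvSplit t with _ | ⟨h, r⟩
    · simp
    · simp only []
      split <;> simp

def pvMapHead (f : List Char → List Char) : List (List Char) → List (List Char)
  | [] => []
  | h :: r => f h :: r

theorem pvSplit_go (fuel : Nat) (l cur : List Char) (acc : List (List Char)) (h : l.length < fuel) :
    PySem.Chars.splitOn.go ['\n'] fuel l cur acc
      = acc.reverse ++ pvMapHead (cur.reverse ++ ·) (pvSplit l) := by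
  induction fuel generalizing l cur acc with
  | zero => omega
  | succ n ih =>
    cases l with
    | nil =>
      rw [PySem.Chars.splitOn.go.eq_def]
      simp [pvSplit, pvMapHead]
    | cons c t =>
      rw [PySem.Chars.splitOn.go.eq_def]
      simp only []
      by_cases hc : c = '\n'
      · subst hc
        rw [if_pos (by simp [List.isPrefixOf])]
        rw [ih _ _ _ (by simp at h ⊢; omega)]
        rw [pvSplit]
        rcases hs : pvSplit t with _ | ⟨hh, r⟩
        · exact absurd hs (pvSplit_ne_nil t)
        · simp [hs, pvMapHead]
      · rw [if_neg (by simp [List.isPrefixOf]; exact fun hh => absurd hh.symm hc)]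
        rw [ih _ _ _ (by simp at h ⊢; omega)]
        rw [pvSplit]
        rcases hs : pvSplit t with _ | ⟨hh, r⟩
        · exact absurd hs (pvSplit_ne_nil t)
        · simp [hs, pvMapHead, if_neg hc]

-- ---- strip facts ----
theorem pvHead_dropWhile {p : Char → Bool} {l : List Char} {c : Char}
    (h : (l.dropWhile p).head? = some c) : p c = false := by
  induction l with
  | nil => simp at h
  | cons a t ih =>
    rw [List.dropWhile_cons] at h
    split at h
    · exact ih h
    · simp at h; subst h; simpa using by simp_all

def pvEdgeOK (x : List Char) : Prop :=
  (∀ c, x.head? = some c → PySem.Chars.isspace c = false) ∧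
  (∀ c, x.getLast? = some c → PySem.Chars.isspace c = false)

theorem pvMem_strip {x : List Char} {c : Char} (h : c ∈ PySem.Chars.strip x) : c ∈ x := by
  have h1 : c ∈ PySem.Chars.lstrip x := by
    have : PySem.Chars.rstrip (PySem.Chars.lstrip x) = _ := rfl
    rw [PySem.Chars.strip] at h
    rw [PySem.Chars.rstrip] at h
    have := (List.dropWhile_sublist (l := (PySem.Chars.lstrip x).reverse) PySem.Chars.isspace).mem
      (by simpa using h)
    simpa using this
  exact (List.dropWhile_sublist _).mem h1

theorem pvEdgeOK_strip (x : List Char) : pvEdgeOK (PySem.Chars.strip x) := by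
  constructor
  · intro c hc
    rw [PySem.Chars.strip, PySem.Chars.rstrip] at hc
    have hpre : (List.dropWhile PySem.Chars.isspace (PySem.Chars.lstrip x).reverse).reverse
        <+: PySem.Chars.lstrip x := by
      have := List.dropWhile_suffix (l := (PySem.Chars.lstrip x).reverse) PySem.Chars.isspace
      have h2 := this.reverse
      simpa using h2
    obtain ⟨tl, htl⟩ := hpre
    have : (PySem.Chars.lstrip x).head? = some c := by
      rw [← htl]
      rcases hh : (List.dropWhile PySem.Chars.isspace (PySem.Chars.lstrip x).reverse).reverse with _ | ⟨a, u⟩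
      · rw [hh] at hc; simp at hc
      · rw [hh] at hc; simp at hc; simp [hc]
    exact pvHead_dropWhile (p := PySem.Chars.isspace) (l := x) this
  · intro c hc
    rw [PySem.Chars.strip, PySem.Chars.rstrip, List.getLast?_reverse] at hc
    exact pvHead_dropWhile hc

theorem pvLstrip_of_head {x : List Char} (h : ∀ c, x.head? = some c → PySem.Chars.isspace c = false)
    (hx : x ≠ []) : PySem.Chars.lstrip x = x := by
  rcases x with _ | ⟨a, t⟩
  · simp at hx
  · rw [PySem.Chars.lstrip, List.dropWhile_cons, if_neg (by simp [h a rfl])]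

theorem pvRstrip_ne_nil {x : List Char} {c : Char} (h : x.head? = some c)
    (hc : PySem.Chars.isspace c = false) : PySem.Chars.rstrip x ≠ [] := by
  rw [PySem.Chars.rstrip]
  intro hcon
  have : ∀ a ∈ x.reverse, PySem.Chars.isspace a = true :=
    List.dropWhile_eq_nil_iff.mp (by simpa using hcon)
  have hcx : c ∈ x := by rcases x with _ | ⟨a, t⟩ <;> simp_all
  have := this c (by simpa using hcx)
  simp [hc] at this

theorem pvRstrip_append {A Z : List Char} (h : PySem.Chars.rstrip Z ≠ []) :
    PySem.Chars.rstrip (A ++ Z) = A ++ PySem.Chars.rstrip Z := by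
  rw [PySem.Chars.rstrip, PySem.Chars.rstrip] at *
  rw [List.reverse_append, List.dropWhile_append]
  rw [if_neg (by simpa using h)]
  simp

theorem pvRstrip_append_nl {x : List Char} (m : Nat) (hx : x ≠ [])
    (he : ∀ c, x.getLast? = some c → PySem.Chars.isspace c = false) :
    PySem.Chars.rstrip (x ++ List.replicate m '\n') = x := by
  rw [PySem.Chars.rstrip, List.reverse_append, List.dropWhile_append]
  rw [if_pos (by
    rw [List.isEmpty_iff, List.dropWhile_eq_nil_iff]
    intro a ha
    have h2 : a = '\n' := List.eq_of_mem_replicate (by simpa using ha)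
    rw [h2]; decide)]
  have hrev : List.dropWhile PySem.Chars.isspace x.reverse = x.reverse := by
    rcases hh : x.reverse with _ | ⟨a, t⟩
    · rfl
    · rw [List.dropWhile_cons, if_neg ?_]
      have : x.getLast? = some a := by
        have := List.getLast?_reverse (l := x.reverse)
        simp only [List.reverse_reverse] at this
        rw [this, hh]; simp
      simp [he a this]
  rw [hrev]; simp

-- ---- squeeze / pop / join over blank runs ----
def pvSqueeze : Bool → List (List Char) → List (List Char)
  | _, [] => []
  | pb, x :: ls =>
    if x.isEmpty then (if pb then pvSqueeze true ls else [] :: pvSqueeze true ls)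
    else x :: pvSqueeze false ls

def pvPop (ls : List (List Char)) : List (List Char) :=
  if ls.getLast? = some [] then ls.dropLast else ls

theorem pvSqueeze_true_blanks_append (k : Nat) (rest : List (List Char)) :
    pvSqueeze true (List.replicate k [] ++ rest) = pvSqueeze true rest := by
  induction k with
  | zero => rfl
  | succ n ih =>
    rw [List.replicate_succ, List.cons_append]
    rw [show pvSqueeze true ([] :: (List.replicate n [] ++ rest)) = pvSqueeze true (List.replicate n [] ++ rest) by simp [pvSqueeze]]
    exact ih

theorem pvSqueeze_false_blanks_append (k : Nat) (rest : List (List Char)) (hk : k ≠ 0) :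
    pvSqueeze false (List.replicate k [] ++ rest) = [] :: pvSqueeze true rest := by
  obtain ⟨n, rfl⟩ : ∃ n, k = n + 1 := ⟨k - 1, by omega⟩
  rw [List.replicate_succ, List.cons_append]
  rw [show pvSqueeze false ([] :: (List.replicate n [] ++ rest)) = [] :: pvSqueeze true (List.replicate n [] ++ rest) by simp [pvSqueeze]]
  rw [pvSqueeze_true_blanks_append n rest]

theorem pvSqueeze_cons_nonblank (pb : Bool) {y : List Char} (hy : y ≠ []) (ls : List (List Char)) :
    pvSqueeze pb (y :: ls) = y :: pvSqueeze false ls := by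
  rw [pvSqueeze, if_neg (by simpa using hy)]

theorem pvSqueeze_true_dropWhile (F : List (List Char)) :
    pvSqueeze true F = pvSqueeze true (F.dropWhile (·.isEmpty)) := by
  induction F with
  | nil => rfl
  | cons x ls ih =>
    by_cases hx : x.isEmpty
    · rw [List.dropWhile_cons, if_pos hx, ← ih, pvSqueeze, if_pos hx]; simp
    · rw [List.dropWhile_cons, if_neg hx]

theorem pvPop_append {u S : List (List Char)} (hS : S ≠ []) :
    pvPop (u ++ S) = u ++ pvPop S := by
  rw [pvPop, pvPop, List.getLast?_append, List.dropLast_append]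
  rcases hs : S.getLast? with _ | y
  · exact absurd (List.getLast?_eq_none_iff.mp hs) hS
  · simp only [Option.some_or]
    by_cases hy : y = []
    · subst hy; rw [if_pos rfl, if_pos rfl, if_neg (by simpa using hS)]
    · rw [if_neg (by simpa using hy), if_neg (by simpa using hy)]

theorem pvPop_ne_nil {S : List (List Char)} {y : List Char} (hhead : S.head? = some y)
    (hy : y ≠ []) : pvPop S ≠ [] := by
  rcases S with _ | ⟨a, S'⟩
  · simp at hhead
  · simp at hhead; subst hhead
    rw [pvPop]
    rcases S' with _ | ⟨b, S''⟩
    · rw [if_neg (by simp; exact fun h => by simp_all)]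
      simp
    · split <;> simp

theorem pvJoin_blanks_append (k : Nat) {rest : List (List Char)} {y : List Char}
    {rest' : List (List Char)} (hr : rest = y :: rest') :
    PySem.Chars.join ['\n'] (List.replicate k [] ++ rest)
      = List.replicate k '\n' ++ PySem.Chars.join ['\n'] rest := by
  subst hr
  induction k with
  | zero => rfl
  | succ n ih =>
    rw [List.replicate_succ, List.cons_append]
    have hcc : List.replicate n ([] : List Char) ++ y :: rest' =
        (List.replicate n ([] : List Char) ++ y :: rest').head?.getD [] ::
          (List.replicate n ([] : List Char) ++ y :: rest').tail := by
      rcases hh : List.replicate n ([] : List Char) ++ y :: rest' with _ | ⟨q, r⟩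
      · exact absurd hh (by simp)
      · simp
    rw [hcc, PySem.Chars.join_cons_cons, ← hcc, ih]
    simp [List.replicate_succ]

theorem pvJoin_blanks (k : Nat) :
    PySem.Chars.join ['\n'] (List.replicate (k+1) ([] : List Char))
      = List.replicate k '\n' := by
  induction k with
  | zero => rfl
  | succ n ih =>
    have h1 : List.replicate (n+1+1) ([] : List Char) = [] :: [] :: List.replicate n [] := by
      simp [List.replicate_succ]
    have h2 : ([] :: List.replicate n ([] : List Char)) = List.replicate (n+1) [] := by
      simp [List.replicate_succ]
    rw [h1, PySem.Chars.join_cons_cons, h2, ih]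
    simp [List.replicate_succ]

theorem pvHead_dropWhileG {α : Type} {p : α → Bool} {l : List α} {c : α}
    (h : (l.dropWhile p).head? = some c) : p c = false := by
  induction l with
  | nil => simp at h
  | cons a t ih =>
    rw [List.dropWhile_cons] at h
    split at h
    · exact ih h
    · simp at h; subst h; simp_all

theorem pvBlankSplit (ls : List (List Char)) :
    ∃ k rest, ls = List.replicate k ([] : List Char) ++ rest ∧
      ∀ h, rest.head? = some h → h ≠ [] := by
  refine ⟨(ls.takeWhile (·.isEmpty)).length, ls.dropWhile (·.isEmpty), ?_, ?_⟩
  · conv_lhs => rw [← List.takeWhile_append_dropWhile (p := (·.isEmpty)) (l := ls)]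
    congr 1
    exact List.eq_replicate_of_mem (fun b hb => by
      have := List.mem_takeWhile_imp hb; simpa using this)
  · intro h hh
    have := pvHead_dropWhileG hh
    simpa using this

theorem pvJoin_cons (x : List Char) {ls : List (List Char)} (h : ls ≠ []) :
    PySem.Chars.join ['\n'] (x :: ls) = x ++ ['\n'] ++ PySem.Chars.join ['\n'] ls := by
  rcases ls with _ | ⟨q, r⟩
  · simp at h
  · exact PySem.Chars.join_cons_cons _ _ _ _

theorem pvLstrip_append {x r : List Char} (hx : x ≠ [])
    (h : ∀ c, x.head? = some c → PySem.Chars.isspace c = false) :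
    PySem.Chars.lstrip (x ++ r) = x ++ r := by
  rcases x with _ | ⟨a, t⟩
  · simp at hx
  · rw [List.cons_append, PySem.Chars.lstrip, List.dropWhile_cons, if_neg (by simp [h a rfl])]

theorem pvJoin_head {y : List Char} (rest' : List (List Char)) (hy : y ≠ [])
    (hnl : '\n' ∉ y) (he : pvEdgeOK y) :
    ∃ c Y, PySem.Chars.join ['\n'] (y :: rest') = c :: Y ∧ c ≠ '\n' ∧
      PySem.Chars.isspace c = false := by
  rcases y with _ | ⟨c, y'⟩
  · simp at hy
  · refine ⟨c, ?_, ?_, fun hc => by simp [hc] at hnl, he.1 c rfl⟩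
    · exact y' ++ (if rest' = [] then [] else ['\n'] ++ PySem.Chars.join ['\n'] rest')
    · by_cases hr : rest' = []
      · subst hr; simp [PySem.Chars.join_singleton]
      · rw [pvJoin_cons _ hr, if_neg hr]; simp

theorem pvMain (n : Nat) (L : List (List Char)) (hn : L.length ≤ n)
    (hprops : ∀ x ∈ L, '\n' ∉ x ∧ pvEdgeOK x)
    (hhead : ∀ h, L.head? = some h → h ≠ []) :
    PySem.Chars.strip (pvNorm (PySem.Chars.join ['\n'] L))
      = PySem.Chars.join ['\n'] (pvPop (pvSqueeze true L)) := by
  induction n generalizing L with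
  | zero =>
    have : L = [] := List.eq_nil_of_length_eq_zero (by omega)
    subst this; decide
  | succ n ih =>
    rcases L with _ | ⟨x, ls⟩
    · decide
    have hx : x ≠ [] := hhead x rfl
    obtain ⟨hxnl, hxe⟩ := hprops x (by simp)
    obtain ⟨k, rest, rfl, hresth⟩ := pvBlankSplit ls
    rcases hrest : rest with _ | ⟨y, rest'⟩
    · subst hrest
      rcases k with _ | j
      · -- L = [x]
        simp only [List.replicate_zero, List.append_nil, List.nil_append]
        rw [PySem.Chars.join_singleton]
        have hnx : pvNorm x = x := by
          have := pvNorm_append_left x [] hxnl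
          have h0 : pvNorm ([] : List Char) = [] := rfl
          simpa [h0] using this
        rw [hnx, PySem.Chars.strip, pvLstrip_of_head hxe.1 hx]
        have := pvRstrip_append_nl (x := x) 0 hx hxe.2
        simp only [List.replicate_zero, List.append_nil] at this
        rw [this]
        rw [pvSqueeze_cons_nonblank true hx, pvSqueeze]
        rw [pvPop, if_neg (by simpa using hx)]
        rw [PySem.Chars.join_singleton]
      · -- L = x :: blank^(j+1)
        have hJ : PySem.Chars.join ['\n'] (x :: (List.replicate (j+1) ([] : List Char) ++ []))
            = x ++ List.replicate (j+1) '\n' := by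
          rw [List.append_nil, pvJoin_cons x (by simp), pvJoin_blanks j]
          simp [List.replicate_succ]
        rw [hJ]
        rw [pvNorm_append_left x _ hxnl]
        rw [show pvNorm (List.replicate (j+1) '\n')
              = List.replicate (min (j+1) 2) '\n' by
          have := pvNorm_run (j+1) [] (Or.inl rfl)
          have h0 : pvNorm ([] : List Char) = [] := rfl
          simpa [h0] using this]
        rw [PySem.Chars.strip, pvLstrip_append hx hxe.1, pvRstrip_append_nl _ hx hxe.2]
        rw [pvSqueeze_cons_nonblank true hx, List.append_nil]
        have hsq : pvSqueeze false (List.replicate (j+1) ([] : List Char)) = [[]] := by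
          have := pvSqueeze_false_blanks_append (j+1) [] (by omega)
          simpa using this
        rw [hsq, pvPop, if_pos (by simp)]
        simp [PySem.Chars.join_singleton]
    · -- rest = y :: rest'
      have hy : y ≠ [] := hresth y (by simp [hrest])
      have hymem : y ∈ x :: (List.replicate k ([] : List Char) ++ rest) := by
        simp [hrest]
      obtain ⟨hynl, hye⟩ := hprops y hymem
      subst hrest
      -- join decomposition
      have hls : List.replicate k ([] : List Char) ++ y :: rest' ≠ [] := by simp
      have hJL : PySem.Chars.join ['\n'] (x :: (List.replicate k ([] : List Char) ++ y :: rest'))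
          = x ++ (List.replicate (k+1) '\n' ++ PySem.Chars.join ['\n'] (y :: rest')) := by
        rw [pvJoin_cons x hls, pvJoin_blanks_append k rfl]
        simp [List.replicate_succ]
      rw [hJL, pvNorm_append_left x _ hxnl]
      obtain ⟨c, Y, hcY, hcnl, hcsp⟩ := pvJoin_head rest' hy hynl hye
      rw [hcY, pvNorm_run (k+1) _ (Or.inr ⟨c, Y, rfl, hcnl⟩)]
      rw [pvNorm_cons_ne _ hcnl]
      -- strip
      rw [PySem.Chars.strip, pvLstrip_append hx hxe.1]
      have hZhead : (c :: pvNorm Y).head? = some c := rfl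
      have hrne : PySem.Chars.rstrip (c :: pvNorm Y) ≠ [] := pvRstrip_ne_nil hZhead hcsp
      rw [show x ++ (List.replicate (min (k+1) 2) '\n' ++ c :: pvNorm Y)
            = (x ++ List.replicate (min (k+1) 2) '\n') ++ (c :: pvNorm Y) by simp]
      rw [pvRstrip_append hrne]
      -- IH on rest
      have hIH := ih (y :: rest') (by simp at hn ⊢; omega)
        (fun z hz => hprops z (by simp [hz]))
        (fun h hh => by simp at hh; subst hh; exact hy)
      rw [hcY] at hIH
      rw [pvNorm_cons_ne _ hcnl] at hIH
      rw [PySem.Chars.strip, pvLstrip_of_head (fun d hd => by rw [hZhead] at hd; injection hd with h; rw [← h]; exact hcsp) (by simp)] at hIH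
      rw [hIH]
      -- squeeze side
      set S := pvSqueeze true (y :: rest') with hS
      have hSform : S = y :: pvSqueeze false rest' := pvSqueeze_cons_nonblank true hy rest'
      have hSne : S ≠ [] := by rw [hSform]; simp
      have hSpop : pvPop S ≠ [] := pvPop_ne_nil (by rw [hSform]; rfl) hy
      rcases k with _ | j
      · have : pvSqueeze false (List.replicate 0 ([] : List Char) ++ y :: rest') = S := by
          rw [hSform]; simpa using pvSqueeze_cons_nonblank false hy rest'
        rw [pvSqueeze_cons_nonblank true hx, this]
        rw [show (x :: S) = [x] ++ S by rfl, pvPop_append hSne]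
        rw [show ([x] ++ pvPop S) = x :: pvPop S by rfl, pvJoin_cons x hSpop]
        simp [List.replicate_succ]
      · rw [pvSqueeze_cons_nonblank true hx,
          pvSqueeze_false_blanks_append (j+1) _ (by omega), ← hS]
        rw [show (x :: [] :: S) = [x, []] ++ S by rfl, pvPop_append hSne]
        rw [show ([x, []] ++ pvPop S) = x :: [] :: pvPop S by rfl]
        rw [pvJoin_cons x (by simp), pvJoin_cons [] hSpop]
        have : min (j+1+1) 2 = 2 := by omega
        rw [this]
        simp [List.replicate_succ]

theorem pvSplitOn_eq (l : List Char) : PySem.Chars.splitOn l ['\n'] = pvSplit l := by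
  rw [PySem.Chars.splitOn, pvSplit_go (l.length+1) l [] [] (by omega)]
  rcases hs : pvSplit l with _ | ⟨h, r⟩
  · exact absurd hs (pvSplit_ne_nil l)
  · simp [pvMapHead]

theorem pvSplit_no_nl (l : List Char) : ∀ x ∈ pvSplit l, '\n' ∉ x := by
  induction l with
  | nil => simp [pvSplit]
  | cons c t ih =>
    rw [pvSplit]
    rcases hs : pvSplit t with _ | ⟨h, r⟩
    · exact absurd hs (pvSplit_ne_nil t)
    · simp only []
      by_cases hc : c = '\n'
      · rw [if_pos hc]
        intro x hx
        rw [List.mem_cons] at hx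
        rcases hx with h1 | hx
        · subst h1; simp
        · exact ih x (hs ▸ hx)
      · rw [if_neg hc]
        intro x hx
        rw [List.mem_cons] at hx
        rcases hx with h1 | hx
        · subst h1
          simp only [List.mem_cons, not_or]
          constructor
          · exact fun h1 => hc h1.symm
          · exact fun hm => ih h (by rw [hs]; simp) hm
        · exact ih x (by rw [hs]; simp [hx])

-- the common filtered line list
def pvKeep (line : List Char) : Bool :=
  !(PySem.Chars.isIn "Contributors".toList line || PySem.Chars.isIn "Embed".toList line) &&
  !(PySem.Chars.startswith line "[".toList && PySem.Chars.endswith line "]".toList) &&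
  !(PySem.Chars.isIn "You might also like".toList line)

def pvF (ls : List (List Char)) : List (List Char) :=
  (ls.map PySem.Chars.strip).filter pvKeep


theorem pvFoldA (ls : List (List Char)) (acc : List (List Char)) :
    List.foldl pvStepA acc ls =
      if acc = [] then (pvF ls).dropWhile (·.isEmpty) else acc ++ pvF ls := by
  induction ls generalizing acc with
  | nil => simp [pvF]
  | cons a t ih =>
    rw [List.foldl_cons]
    simp only [pvStepA]
    have hF : pvF (a :: t) = if pvKeep (PySem.Chars.strip a)
        then PySem.Chars.strip a :: pvF t else pvF t := by
      rw [pvF, List.map_cons, List.filter_cons]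
      split <;> rfl
    by_cases h1 : (PySem.Chars.isIn "Contributors".toList (PySem.Chars.strip a)
        || PySem.Chars.isIn "Embed".toList (PySem.Chars.strip a)) = true
    · have hk : pvKeep (PySem.Chars.strip a) = false := by
        simp at h1
        simp [pvKeep]
        intro hA hB _
        rcases h1 with h | h <;> simp_all
      rw [if_pos h1, ih, hF, hk]
      simp
    · rw [if_neg h1]
      by_cases h2 : (PySem.Chars.startswith (PySem.Chars.strip a) "[".toList
          && PySem.Chars.endswith (PySem.Chars.strip a) "]".toList) = true
      · have hk : pvKeep (PySem.Chars.strip a) = false := by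
          simp at h2
          simp [pvKeep]
          intro _ _ hor
          rcases hor with h | h <;> simp_all
        rw [if_pos h2, ih, hF, hk]
        simp
      · rw [if_neg h2]
        by_cases h3 : PySem.Chars.isIn "You might also like".toList (PySem.Chars.strip a) = true
        · have hk : pvKeep (PySem.Chars.strip a) = false := by
            simp [pvKeep]
            intro _ _ _
            exact h3
          rw [if_pos h3, ih, hF, hk]
          simp
        · have hk : pvKeep (PySem.Chars.strip a) = true := by
            simp at h1 h2 h3
            simp [pvKeep, h1.1, h1.2, h3]
            by_cases hsw : PySem.Chars.startswith (PySem.Chars.strip a) ['['] = true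
            · simp [hsw, h2 hsw]
            · simp at hsw
              simp [hsw]
          rw [if_neg h3, hF, hk]
          simp only [if_true]
          by_cases h4 : (acc.isEmpty && (PySem.Chars.strip a).isEmpty) = true
          · simp only [Bool.and_eq_true, List.isEmpty_iff] at h4
            rw [if_pos (by simp [h4.1, h4.2]), ih, if_pos h4.1, if_pos h4.1,
              List.dropWhile_cons, if_pos (by simp [h4.2])]
          · rw [if_neg h4, ih, if_neg (by simp)]
            by_cases ha : acc = []
            · subst ha
              simp only [List.isEmpty_nil, Bool.true_and, List.isEmpty_iff] at h4
              rw [if_pos rfl, List.dropWhile_cons, if_neg (by simpa using h4)]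
              simp
            · rw [if_neg ha]
              simp

theorem pvFoldB (ls : List (List Char)) (acc : List (List Char)) (pb : Bool) :
    (List.foldl pvStepB (acc, pb) ls).1 = acc ++ pvSqueeze pb (pvF ls) := by
  induction ls generalizing acc pb with
  | nil => simp [pvF, pvSqueeze]
  | cons a t ih =>
    rw [List.foldl_cons]
    simp only [pvStepB]
    have hF : pvF (a :: t) = if pvKeep (PySem.Chars.strip a)
        then PySem.Chars.strip a :: pvF t else pvF t := by
      rw [pvF, List.map_cons, List.filter_cons]
      split <;> rfl
    by_cases h1 : (PySem.Chars.isIn "Contributors".toList (PySem.Chars.strip a)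
        || PySem.Chars.isIn "Embed".toList (PySem.Chars.strip a)) = true
    · have hk : pvKeep (PySem.Chars.strip a) = false := by
        simp at h1
        simp [pvKeep]
        intro hA hB _
        rcases h1 with h | h <;> simp_all
      rw [if_pos h1, ih, hF, hk]
      simp
    · rw [if_neg h1]
      by_cases h2 : (PySem.Chars.startswith (PySem.Chars.strip a) "[".toList
          && PySem.Chars.endswith (PySem.Chars.strip a) "]".toList) = true
      · have hk : pvKeep (PySem.Chars.strip a) = false := by
          simp at h2
          simp [pvKeep]
          intro _ _ hor
          rcases hor with h | h <;> simp_all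
        rw [if_pos h2, ih, hF, hk]
        simp
      · rw [if_neg h2]
        by_cases h3 : PySem.Chars.isIn "You might also like".toList (PySem.Chars.strip a) = true
        · have hk : pvKeep (PySem.Chars.strip a) = false := by
            simp [pvKeep]
            intro _ _ _
            exact h3
          rw [if_pos h3, ih, hF, hk]
          simp
        · have hk : pvKeep (PySem.Chars.strip a) = true := by
            simp at h1 h2 h3
            simp [pvKeep, h1.1, h1.2, h3]
            by_cases hsw : PySem.Chars.startswith (PySem.Chars.strip a) ['['] = true
            · simp [hsw, h2 hsw]
            · simp at hsw
              simp [hsw]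
          rw [if_neg h3, hF, hk]
          simp only [if_true]
          by_cases h4 : (PySem.Chars.strip a).isEmpty = true
          · rw [if_pos h4]
            have hsq : pvSqueeze pb (PySem.Chars.strip a :: pvF t)
                = if pb then pvSqueeze true (pvF t) else [] :: pvSqueeze true (pvF t) := by
              rw [pvSqueeze, if_pos h4]
            rw [hsq]
            rcases pb with _ | _
            · rw [if_neg (by simp), ih]
              simp only [Bool.false_eq_true, if_false]
              rw [List.isEmpty_iff.mp h4]
              simp
            · rw [if_pos rfl, ih]
              simp
          · rw [if_neg h4, ih]
            have hsq : pvSqueeze pb (PySem.Chars.strip a :: pvF t)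
                = PySem.Chars.strip a :: pvSqueeze false (pvF t) := by
              rw [pvSqueeze, if_neg h4]
            rw [hsq]
            simp

theorem pvKernel (l : List Char) :
    PySem.Chars.strip (pvCollapse (PySem.Chars.join ['\n']
        (List.foldl pvStepA [] (PySem.Chars.splitOn l ['\n']))))
      = PySem.Chars.join ['\n']
        (if PySem.List.pyGet? (List.foldl pvStepB ([], true) (PySem.Chars.splitOn l ['\n'])).1 (-1)
              = some [] then
          (List.foldl pvStepB ([], true) (PySem.Chars.splitOn l ['\n'])).1.dropLast
         else (List.foldl pvStepB ([], true) (PySem.Chars.splitOn l ['\n'])).1) := by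
  rw [pvSplitOn_eq, pvFoldA, if_pos rfl]
  have hmem : ∀ x ∈ pvF (pvSplit l), '\n' ∉ x ∧ pvEdgeOK x := by
    intro x hx
    rw [pvF, List.mem_filter] at hx
    obtain ⟨hx1, _⟩ := hx
    rw [List.mem_map] at hx1
    obtain ⟨y, hy, rfl⟩ := hx1
    exact ⟨fun hnl => (pvSplit_no_nl l y hy) (pvMem_strip hnl), pvEdgeOK_strip y⟩
  rw [pvCollapse_eq_pvNorm]
  rw [pvMain ((pvF (pvSplit l)).dropWhile (·.isEmpty)).length _ le_rfl
    (fun x hx => hmem x ((List.dropWhile_sublist _).mem hx))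
    (fun h hh => by have := pvHead_dropWhileG hh; simpa using this)]
  rw [← pvSqueeze_true_dropWhile]
  rw [pvFoldB]
  rw [PySem.List.pyGet?_neg_one]
  rw [List.nil_append]
  rw [pvPop]

-- ===== VERDICT (by name: the statement is the Claim_ definition above) =====
theorem clean_lyrics_py_spec : Claim_equal_clean_lyrics_py := by
  intro lyrics _
  unfold Spec_clean_lyrics_py
  by_cases h : lyrics = ""
  · subst h; decide
  · simp only [clean_lyrics_py, clean_lyrics_py_alt]
    rw [if_neg h]
    exact congrArg String.ofList (pvKernel lyrics.toList)
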